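-- pv_equiv track=rewrite | github.com/ABtheMD/berks-openavmkit | scripts/configure_settings.py | detect_sales_source
-- ===== SOURCE A (Python) =====
-- SALE_PRICE_PATTERNS = [
--     "price", "saleprice", "sale_price", "saleamt", "saleamount",
--     "grantamt", "deed_amount", "deedamount", "granteeprice",
-- ]
--
-- SALE_DATE_PATTERNS = [
--     "saledt", "sale_date", "saledate", "deeddate", "deed_date",
--     "conveyance_date", "dateofsale", "salesdate", "sale_dt",
-- ]
--
-- GEO_ROLE = "geo_parcels"
--
-- def detect_column(columns: list[str], patterns: list[str]) -> str | None:
--     """Return the first column that matches any pattern (case-insensitive exact)."""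
--     lower = {c.lower(): c for c in columns}
--     for p in patterns:
--         if p in lower:
--             return lower[p]
--     return None
--
-- def detect_sales_source(
--     sources: list[dict],
--     schemas: dict[str, list[str]],
-- ) -> tuple[str, str, str] | None:
--     """
--     Find the source most likely to contain sales data.
--     Returns (handle, price_col, date_col) or None.
--     Prefers sources whose role contains 'master' or 'sales'.
--     """
--     candidates = []
--     for source in sources:
--         handle = source["handle"]
--         role = source.get("role", "")
--         if handle not in schemas:
--             continue
--         if role == GEO_ROLE:
--             continue
--         cols = schemas[handle]
--         price_col = detect_column(cols, SALE_PRICE_PATTERNS)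
--         date_col = detect_column(cols, SALE_DATE_PATTERNS)
--         if price_col and date_col:
--             # Score: prefer 'master' or 'sales' roles
--             score = 2 if ("master" in role or "sales" in role) else 1
--             candidates.append((score, handle, price_col, date_col))
--
--     if not candidates:
--         return None
--     candidates.sort(reverse=True)
--     _, handle, price_col, date_col = candidates[0]
--     return handle, price_col, date_col
-- ===== SOURCE B (Python) =====
-- SALE_PRICE_PATTERNS = [
--     "price", "saleprice", "sale_price", "saleamt", "saleamount",
--     "grantamt", "deed_amount", "deedamount", "granteeprice",
-- ]
--
-- SALE_DATE_PATTERNS = [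
--     "saledt", "sale_date", "saledate", "deeddate", "deed_date",
--     "conveyance_date", "dateofsale", "salesdate", "sale_dt",
-- ]
--
-- GEO_ROLE = "geo_parcels"
--
--
-- def _find_column(columns, patterns):
--     """First pattern (in pattern order) that some column equals case-insensitively."""
--     for p in patterns:
--         for col in columns:
--             if col.lower() == p:
--                 return col
--     return None
--
--
-- def detect_sales_source(
--     sources: list[dict],
--     schemas: dict[str, list[str]],
-- ) -> tuple[str, str, str] | None:
--     best = None
--     for source in sources:
--         handle = source["handle"]
--         role = source.get("role", "")
--         if handle not in schemas or role == GEO_ROLE: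
--             continue
--         cols = schemas[handle]
--         price_col = _find_column(cols, SALE_PRICE_PATTERNS)
--         date_col = _find_column(cols, SALE_DATE_PATTERNS)
--         if price_col and date_col:
--             score = 2 if ("master" in role or "sales" in role) else 1
--             cand = (score, handle, price_col, date_col)
--             if best is None or cand > best:
--                 best = cand
--     if best is None:
--         return None
--     return best[1], best[2], best[3]
-- ===== Notes on version B (the rewrite author's own statement) =====
-- stated objective: simpler
-- what changed: B drops A's lowered-column dict and candidates-list-plus-reverse-sort: column detection is a direct first-match pattern/column scan and the best source is a single running maximum under the same full-tuple comparison; Pre_ excludes sources without a 'handle' key (A raises KeyError) and schemas where a sale-price/sale-date pattern is matched case-insensitively by two different spellings of a column name, where A's dict-overwrite (last-spelling-wins) pick is accidental.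
import Mathlib
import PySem

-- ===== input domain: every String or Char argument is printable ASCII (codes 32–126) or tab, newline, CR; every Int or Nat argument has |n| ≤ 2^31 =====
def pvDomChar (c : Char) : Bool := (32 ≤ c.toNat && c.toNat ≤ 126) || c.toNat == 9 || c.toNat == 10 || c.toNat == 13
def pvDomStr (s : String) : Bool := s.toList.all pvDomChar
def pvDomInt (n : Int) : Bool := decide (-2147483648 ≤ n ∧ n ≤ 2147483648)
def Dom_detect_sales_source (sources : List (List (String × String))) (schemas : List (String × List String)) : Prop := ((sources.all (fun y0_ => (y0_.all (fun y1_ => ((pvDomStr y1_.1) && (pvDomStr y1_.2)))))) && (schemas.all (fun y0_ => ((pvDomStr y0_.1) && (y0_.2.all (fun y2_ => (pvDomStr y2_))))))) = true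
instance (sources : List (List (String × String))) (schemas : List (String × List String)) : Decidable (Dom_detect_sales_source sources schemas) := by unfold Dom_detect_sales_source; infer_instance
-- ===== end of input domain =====

-- B replaces A's lowered-column dict + candidate list + reverse sort with a direct
-- first-match pattern/column scan and a single running maximum (objective: simpler).


-- shared module-level constants of the Python module
def SALE_PRICE_PATTERNS : List String :=
  ["price", "saleprice", "sale_price", "saleamt", "saleamount",
   "grantamt", "deed_amount", "deedamount", "granteeprice"]

def SALE_DATE_PATTERNS : List String :=
  ["saledt", "sale_date", "saledate", "deeddate", "deed_date",
   "conveyance_date", "dateofsale", "salesdate", "sale_dt"]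

-- Python truthiness of an Optional[str]: None and "" are falsy (both A and B write
-- 'if price_col and date_col')
def pyTruthyStr (o : Option String) : Bool :=
  match o with
  | none => false
  | some s => decide (s ≠ "")

-- Python's built-in comparison of a (int, str, str, str) tuple IS the lexicographic
-- (Lex) order on the components; PySem guarantees Lean's '<' on String is Python's
-- code-point str '<'.  Used by A's sort key and by B's running-max comparison.
def tupKey (c : Int × String × String × String) :
    Lex (Int × Lex (String × Lex (String × String))) :=
  toLex (c.1, toLex (c.2.1, toLex (c.2.2.1, c.2.2.2)))

-- ===== PORT A =====

-- {c.lower(): c for c in columns}  (later columns overwrite earlier ones)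
def buildLower (columns : List String) : PySem.Dict String String :=
  columns.foldl (fun d c => d.insert (PySem.Str.lower c) c) PySem.Dict.empty

-- 'for p in patterns: if p in lower: return lower[p]'
def dcLoop (lower : PySem.Dict String String) : List String → Option String
  | [] => none
  | p :: rest => if lower.contains p then lower.get? p else dcLoop lower rest

def detect_column (columns : List String) (patterns : List String) : Option String :=
  dcLoop (buildLower columns) patterns

-- the body of A's 'for source in sources' loop (acc = the candidates list so far)
def stepA (sd : PySem.Dict String (List String))
    (acc : List (Int × String × String × String)) (source : List (String × String)) :
    List (Int × String × String × String) :=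
  match (PySem.Dict.mk source).get? "handle" with
  | none => acc  -- Python raises KeyError here; such inputs are excluded by Pre_
  | some handle =>
    let role := (PySem.Dict.mk source).getD "role" ""
    if !sd.contains handle then acc
    else if role == "geo_parcels" then acc
    else
      let cols := sd.getD handle []
      let price_col := detect_column cols SALE_PRICE_PATTERNS
      let date_col := detect_column cols SALE_DATE_PATTERNS
      if pyTruthyStr price_col && pyTruthyStr date_col then
        let score : Int :=
          if PySem.Str.isIn "master" role || PySem.Str.isIn "sales" role then 2 else 1
        -- .getD "" only unwraps: the truthiness guard ensures both are some _
        acc ++ [(score, handle, price_col.getD "", date_col.getD "")]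
      else acc

def detect_sales_source (sources : List (List (String × String))) (schemas : List (String × List String)) : Option (String × String × String) :=
  let candidates := sources.foldl (stepA (PySem.Dict.mk schemas)) []
  if candidates.isEmpty then none
  else
    match PySem.List.sorted candidates tupKey true with
    | [] => none
    | c :: _ => some (c.2.1, c.2.2.1, c.2.2.2)

-- ===== PORT B =====

-- first pattern (in pattern order) that some column equals case-insensitively
def findColumn (columns : List String) (patterns : List String) : Option String :=
  patterns.findSome? (fun p => columns.find? (fun c => PySem.Str.lower c == p))

-- the body of B's loop: fold the source's candidate (if any) into the running best
def stepB (sd : PySem.Dict String (List String))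
    (best : Option (Int × String × String × String)) (source : List (String × String)) :
    Option (Int × String × String × String) :=
  match (PySem.Dict.mk source).get? "handle" with
  | none => best  -- Python raises KeyError here; such inputs are excluded by Pre_
  | some handle =>
    let role := (PySem.Dict.mk source).getD "role" ""
    if !sd.contains handle || role == "geo_parcels" then best
    else
      let cols := sd.getD handle []
      let price_col := findColumn cols SALE_PRICE_PATTERNS
      let date_col := findColumn cols SALE_DATE_PATTERNS
      if pyTruthyStr price_col && pyTruthyStr date_col then
        let cand : Int × String × String × String :=
          (if PySem.Str.isIn "master" role || PySem.Str.isIn "sales" role then 2 else 1,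
           handle, price_col.getD "", date_col.getD "")
        match best with
        | none => some cand
        | some b => if tupKey b < tupKey cand then some cand else some b
      else best

def detect_sales_source_alt (sources : List (List (String × String))) (schemas : List (String × List String)) : Option (String × String × String) :=
  (sources.foldl (stepB (PySem.Dict.mk schemas)) none).map (fun b => (b.2.1, b.2.2.1, b.2.2.2))

-- ===== PRECONDITION & SPEC =====
-- Pre_ excludes (a) inputs on which A raises KeyError — a source dict without a
-- "handle" key (B raises there too) — and (b) schemas where some sale-price/sale-date
-- pattern is matched case-insensitively by two DIFFERENT spellings of a column name:
-- there A's dict-overwrite pick of the LAST spelling is an accident of the dict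
-- comprehension and either spelling is a defensible answer.
def Pre_detect_sales_source (sources : List (List (String × String))) (schemas : List (String × List String)) : Prop :=
  (∀ source ∈ sources, (PySem.Dict.mk source).contains "handle" = true) ∧
  (∀ e ∈ schemas, ∀ p ∈ SALE_PRICE_PATTERNS ++ SALE_DATE_PATTERNS,
    ∀ c1 ∈ e.2, ∀ c2 ∈ e.2, PySem.Str.lower c1 = p → PySem.Str.lower c2 = p → c1 = c2)
instance (sources : List (List (String × String))) (schemas : List (String × List String)) : Decidable (Pre_detect_sales_source sources schemas) := by unfold Pre_detect_sales_source; infer_instance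

def pvWitness_detect_sales_source : (List (List (String × String))) × (List (String × List String)) :=
  ([[("handle", "s1"), ("role", "sales")]], [("s1", ["SalePrice", "sale_date"])])

def Spec_detect_sales_source (sources : List (List (String × String))) (schemas : List (String × List String)) (out : Option (String × String × String)) : Prop := out = detect_sales_source_alt sources schemas
instance (sources : List (List (String × String))) (schemas : List (String × List String)) (out : Option (String × String × String)) : Decidable (Spec_detect_sales_source sources schemas out) := by unfold Spec_detect_sales_source; infer_instance

-- ===== CLAIM (what is proved, stated in full; the proofs are below) =====
def Claim_equal_detect_sales_source : Prop := ∀ (sources : List (List (String × String))) (schemas : List (String × List String)), Dom_detect_sales_source sources schemas → Pre_detect_sales_source sources schemas → Spec_detect_sales_source sources schemas (detect_sales_source sources schemas)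

-- ===== LEMMAS AND PROOFS =====

-- the lowered-column dict looked up at p = last column whose .lower() is p
theorem buildLower_get? (cols : List String) (d0 : PySem.Dict String String) (p : String) :
    (cols.foldl (fun d c => d.insert (PySem.Str.lower c) c) d0).get? p
      = (cols.reverse.find? (fun c => PySem.Str.lower c == p)).or (d0.get? p) := by
  induction cols generalizing d0 with
  | nil => simp
  | cons c cs ih =>
    simp only [List.foldl_cons, List.reverse_cons, List.find?_append, ih, Option.or_assoc]
    congr 1
    by_cases hp : p = PySem.Str.lower c
    · simp [hp]
    · have hb : (PySem.Str.lower c == p) = false := by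
        simp only [beq_eq_false_iff_ne, ne_eq]
        exact fun h => hp h.symm
      simp [PySem.Dict.get?_insert, hp, hb]

-- when every column matching a pattern is the same string, last match = first match
theorem find?_reverse_of_unique (cols : List String) (p : String)
    (hu : ∀ c1 ∈ cols, ∀ c2 ∈ cols, PySem.Str.lower c1 = p → PySem.Str.lower c2 = p → c1 = c2) :
    cols.reverse.find? (fun c => PySem.Str.lower c == p)
      = cols.find? (fun c => PySem.Str.lower c == p) := by
  cases hf : cols.find? (fun c => PySem.Str.lower c == p) with
  | none =>
    rw [List.find?_eq_none] at hf ⊢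
    intro x hx
    exact hf x (List.mem_reverse.mp hx)
  | some a =>
    have ha : a ∈ cols := List.mem_of_find?_eq_some hf
    have hpa : PySem.Str.lower a = p := by simpa using List.find?_some hf
    cases hr : cols.reverse.find? (fun c => PySem.Str.lower c == p) with
    | none =>
      rw [List.find?_eq_none] at hr
      exact absurd (by simpa using hpa) (by simpa using hr a (List.mem_reverse.mpr ha))
    | some b =>
      have hb : b ∈ cols := List.mem_reverse.mp (List.mem_of_find?_eq_some hr)
      have hpb : PySem.Str.lower b = p := by simpa using List.find?_some hr
      rw [hu b hb a ha hpb hpa]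

-- A's dict-based column detection equals B's first-match double scan when each
-- pattern is matched by at most one spelling
theorem detect_column_eq_findColumn (cols pats : List String)
    (hn : ∀ p ∈ pats, ∀ c1 ∈ cols, ∀ c2 ∈ cols,
      PySem.Str.lower c1 = p → PySem.Str.lower c2 = p → c1 = c2) :
    detect_column cols pats = findColumn cols pats := by
  induction pats with
  | nil => rfl
  | cons p rest ih =>
    have hS : (buildLower cols).get? p
        = cols.find? (fun c => PySem.Str.lower c == p) := by
      rw [← find?_reverse_of_unique cols p (hn p (by simp))]
      simpa [buildLower] using buildLower_get? cols PySem.Dict.empty p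
    have ih2 := ih (fun q hq => hn q (by simp [hq]))
    simp only [detect_column, findColumn, dcLoop, List.findSome?_cons] at *
    rw [PySem.Dict.contains_eq_isSome_get?, hS]
    cases h : cols.find? (fun c => PySem.Str.lower c == p) with
    | some x => simp
    | none => simpa using ih2

-- any value the schemas dict can hand out is [] or one of the schemas' column lists
theorem mk_get?_mem_values (l : List (String × List String)) (k : String) (v : List String) :
    (PySem.Dict.mk l).get? k = some v → v ∈ l.map Prod.snd := by
  induction l with
  | nil =>
    intro h
    simp [show PySem.Dict.mk ([] : List (String × List String)) = PySem.Dict.empty from rfl,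
      PySem.Dict.get?_empty] at h
  | cons p t ih =>
    cases p with | mk a b =>
    rw [PySem.Dict.get?_mk_cons]
    intro h
    split at h
    · simp at h; simp [h]
    · simpa using Or.inr (ih h)

-- the per-source candidate (none = this source is skipped / has no sales columns)
def candOf (sd : PySem.Dict String (List String)) (source : List (String × String)) :
    Option (Int × String × String × String) :=
  match (PySem.Dict.mk source).get? "handle" with
  | none => none
  | some handle =>
    let role := (PySem.Dict.mk source).getD "role" ""
    if !sd.contains handle then none
    else if role == "geo_parcels" then none
    else
      let cols := sd.getD handle []
      let price_col := detect_column cols SALE_PRICE_PATTERNS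
      let date_col := detect_column cols SALE_DATE_PATTERNS
      if pyTruthyStr price_col && pyTruthyStr date_col then
        some (if PySem.Str.isIn "master" role || PySem.Str.isIn "sales" role then 2 else 1,
              handle, price_col.getD "", date_col.getD "")
      else none

theorem stepA_eq (sd : PySem.Dict String (List String)) (acc : List (Int × String × String × String))
    (s : List (String × String)) :
    stepA sd acc s = match candOf sd s with | none => acc | some c => acc ++ [c] := by
  unfold stepA candOf
  cases h : (PySem.Dict.mk s).get? "handle" with
  | none => rfl
  | some handle => dsimp only; split_ifs <;> rfl

theorem stepB_eq (sd : PySem.Dict String (List String)) (best : Option (Int × String × String × String))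
    (s : List (String × String))
    (hn : ∀ k, ∀ p ∈ SALE_PRICE_PATTERNS ++ SALE_DATE_PATTERNS,
      ∀ c1 ∈ sd.getD k [], ∀ c2 ∈ sd.getD k [],
        PySem.Str.lower c1 = p → PySem.Str.lower c2 = p → c1 = c2) :
    stepB sd best s = match candOf sd s with
      | none => best
      | some c =>
        match best with
        | none => some c
        | some b => if tupKey b < tupKey c then some c else some b := by
  unfold stepB candOf
  cases h : (PySem.Dict.mk s).get? "handle" with
  | none => rfl
  | some handle =>
    have hdc : ∀ pats : List String, (∀ q ∈ pats, q ∈ SALE_PRICE_PATTERNS ++ SALE_DATE_PATTERNS) →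
        detect_column (sd.getD handle []) pats = findColumn (sd.getD handle []) pats := by
      intro pats hsub
      exact detect_column_eq_findColumn _ _ (fun q hq => hn handle q (hsub q hq))
    simp only [← hdc SALE_PRICE_PATTERNS (by intro q hq; exact List.mem_append_left _ hq),
      ← hdc SALE_DATE_PATTERNS (by intro q hq; exact List.mem_append_right _ hq)]
    by_cases h1 : (!sd.contains handle) = true <;>
      by_cases h2 : (((PySem.Dict.mk s).getD "role" "") == "geo_parcels") = true <;>
        simp only [h1, h2, Bool.or_true, Bool.true_or, Bool.false_or, if_true,
          Bool.not_eq_true] at * <;>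
      simp_all <;> split_ifs <;> rfl

-- A's accumulation loop builds exactly the filterMap of candOf
theorem foldlA (sd : PySem.Dict String (List String)) (sources : List (List (String × String)))
    (init : List (Int × String × String × String)) :
    sources.foldl (stepA sd) init = init ++ sources.filterMap (candOf sd) := by
  induction sources generalizing init with
  | nil => simp
  | cons s ss ih =>
    rw [List.foldl_cons, List.filterMap_cons, stepA_eq]
    cases candOf sd s <;> simp [ih]

theorem tupKey_injective : Function.Injective tupKey := by
  intro a b h
  simp only [tupKey, toLex_inj, Prod.mk.injEq] at h
  obtain ⟨h1, h2, h3, h4⟩ := h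
  exact Prod.ext h1 (Prod.ext h2 (Prod.ext h3 h4))

-- the running-max step of B's loop, as a standalone function for the proofs
def myStep (acc : Option (Int × String × String × String))
    (x : Int × String × String × String) : Option (Int × String × String × String) :=
  match acc with
  | none => some x
  | some m => if tupKey m < tupKey x then some x else some m

-- B's loop is the running max (myStep) over the filterMap of candOf
theorem foldlB (sd : PySem.Dict String (List String)) (sources : List (List (String × String)))
    (b0 : Option (Int × String × String × String))
    (hn : ∀ k, ∀ p ∈ SALE_PRICE_PATTERNS ++ SALE_DATE_PATTERNS,
      ∀ c1 ∈ sd.getD k [], ∀ c2 ∈ sd.getD k [],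
        PySem.Str.lower c1 = p → PySem.Str.lower c2 = p → c1 = c2) :
    sources.foldl (stepB sd) b0 = (sources.filterMap (candOf sd)).foldl myStep b0 := by
  induction sources generalizing b0 with
  | nil => rfl
  | cons s ss ih =>
    rw [List.foldl_cons, List.filterMap_cons, stepB_eq sd b0 s hn]
    cases candOf sd s with
    | none => exact ih b0
    | some c => simp only [List.foldl_cons]; exact ih (myStep b0 c)

-- a running max from a seed returns a maximal element (the seed or a list element)
theorem foldl_myStep_spec (l : List (Int × String × String × String))
    (b : Int × String × String × String) :
    ∃ r, l.foldl myStep (some b) = some r ∧ (r = b ∨ r ∈ l) ∧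
      tupKey b ≤ tupKey r ∧ ∀ y ∈ l, tupKey y ≤ tupKey r := by
  induction l generalizing b with
  | nil => exact ⟨b, rfl, Or.inl rfl, le_refl _, by simp⟩
  | cons x t ih =>
    rw [List.foldl_cons]
    by_cases h : tupKey b < tupKey x
    · obtain ⟨r, hr, hmem, hle, hall⟩ := ih x
      refine ⟨r, by simpa [myStep, h] using hr, ?_, le_of_lt (lt_of_lt_of_le h hle), ?_⟩
      · rcases hmem with h' | h' <;> simp [h']
      · intro y hy
        rcases List.mem_cons.mp hy with h' | h'
        · exact h' ▸ hle
        · exact hall y h'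
    · obtain ⟨r, hr, hmem, hle, hall⟩ := ih b
      refine ⟨r, by simpa [myStep, h] using hr, ?_, hle, ?_⟩
      · rcases hmem with h' | h' <;> simp [h']
      · intro y hy
        rcases List.mem_cons.mp hy with h' | h'
        · exact h' ▸ le_trans (not_lt.mp h) hle
        · exact hall y h'

-- first element of the descending sort = the running maximum, projected
theorem head_sorted_rev_eq_foldl (l : List (Int × String × String × String)) :
    (match PySem.List.sorted l tupKey true with
     | [] => none
     | c :: _ => some (c.2.1, c.2.2.1, c.2.2.2))
    = (l.foldl myStep none).map (fun b => (b.2.1, b.2.2.1, b.2.2.2)) := by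
  cases l with
  | nil => rfl
  | cons x t =>
    obtain ⟨r, hr, hmem, hxr, hall⟩ := foldl_myStep_spec t x
    have hrl : r ∈ x :: t := by rcases hmem with h' | h' <;> simp [h']
    have halll : ∀ y ∈ x :: t, tupKey y ≤ tupKey r := by
      intro y hy
      rcases List.mem_cons.mp hy with h' | h'
      · exact h' ▸ hxr
      · exact hall y h'
    cases hs : PySem.List.sorted (x :: t) tupKey true with
    | nil =>
      exact absurd ((PySem.List.sorted_eq_nil_iff _ tupKey true).mp hs) (by simp)
    | cons m tl =>
      have hm_mem : m ∈ x :: t := by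
        have := (PySem.List.sorted_perm (x :: t) tupKey true).mem_iff (a := m)
        rw [hs] at this
        exact this.mp (by simp)
      have h1 : tupKey m ≤ tupKey r := halll m hm_mem
      have h2 : tupKey r ≤ tupKey m :=
        PySem.List.key_head_sorted_rev_ge (x :: t) tupKey hs r hrl
      have hmr : m = r := tupKey_injective (le_antisymm h1 h2)
      rw [List.foldl_cons, show myStep none x = some x from rfl, hr, hmr]
      rfl

-- ===== VERDICT (by name: the statement is the Claim_ definition above) =====
theorem detect_sales_source_spec : Claim_equal_detect_sales_source := by
  intro sources schemas _ hpre
  have hn : ∀ k, ∀ p ∈ SALE_PRICE_PATTERNS ++ SALE_DATE_PATTERNS,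
      ∀ c1 ∈ (PySem.Dict.mk schemas).getD k [], ∀ c2 ∈ (PySem.Dict.mk schemas).getD k [],
        PySem.Str.lower c1 = p → PySem.Str.lower c2 = p → c1 = c2 := by
    intro k
    rw [PySem.Dict.getD_eq_get?_getD]
    cases h : (PySem.Dict.mk schemas).get? k with
    | none => simp
    | some v =>
      have hv := mk_get?_mem_values schemas k v h
      obtain ⟨e, he, hev⟩ := List.mem_map.mp hv
      simpa [hev] using hpre.2 e he
  unfold Spec_detect_sales_source detect_sales_source detect_sales_source_alt
  rw [foldlA, foldlB _ _ _ hn, List.nil_append, ← head_sorted_rev_eq_foldl]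
  cases hc : (sources.filterMap (candOf (PySem.Dict.mk schemas))).isEmpty with
  | true =>
    rw [List.isEmpty_iff] at hc
    simp only [hc, List.isEmpty_nil, if_true]
    rfl
  | false => simp [hc]
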